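-- pv_equiv track=rewrite | github.com/sazzadrupak/db_api | app/analyze/views.py | characters_count
-- ===== SOURCE A (Python) =====
-- def characters_count(string):
--     """Count only the characters (not numbers)
--     occurrences in the string"""
--     result = []
--     sorted_string_without_space = sorted(string)
--     modified_string = ''.join([i for i in sorted_string_without_space
--                                if not i.isdigit()])
--     unique_characters = set()
--     if modified_string:
--         for c in modified_string:
--             if c not in unique_characters:
--                 unique_characters.add(c)
--                 result.append({c: modified_string.count(c)})
--     return result
-- ===== SOURCE B (Python) =====
-- def characters_count(string):
--     """Count only the characters (not numbers)
--     occurrences in the string"""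
--     chars = sorted(c for c in string if not c.isdigit())
--     result = []
--     i, n = 0, len(chars)
--     while i < n:
--         j = i
--         while j < n and chars[j] == chars[i]:
--             j += 1
--         result.append({chars[i]: j - i})
--         i = j
--     return result
-- ===== Notes on version B (the rewrite author's own statement) =====
-- stated objective: alternative
-- what changed: Replaces A's set-of-seen-characters dedup loop with repeated full-string .count scans by a single two-pointer run-length scan over the sorted digit-filtered characters (each run is one distinct character and its count).
import Mathlib
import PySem

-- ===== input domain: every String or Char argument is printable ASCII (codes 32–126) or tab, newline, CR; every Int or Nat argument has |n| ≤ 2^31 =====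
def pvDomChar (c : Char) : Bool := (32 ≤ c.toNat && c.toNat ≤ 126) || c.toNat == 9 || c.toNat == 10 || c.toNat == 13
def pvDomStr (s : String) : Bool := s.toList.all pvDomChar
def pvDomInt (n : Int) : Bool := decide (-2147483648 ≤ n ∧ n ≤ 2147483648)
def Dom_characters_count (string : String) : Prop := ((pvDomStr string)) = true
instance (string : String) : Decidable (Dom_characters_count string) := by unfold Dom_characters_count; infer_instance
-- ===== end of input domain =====

-- B replaces the seen-set + repeated .count scans by one run-length pass over the sorted filtered characters ('alternative' objective).

-- ===== PORT A =====
def characters_count (string : String) : List (List (String × Int)) :=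
  let sorted_string_without_space := PySem.List.sorted string.toList (fun c => c) false
  -- ''.join of the char comprehension is kept as the char list (exact: only chars are counted)
  let modified_string := sorted_string_without_space.filter (fun i => !(PySem.Chars.isdigit i))
  if modified_string.isEmpty then []
  else
    (modified_string.foldl
      (fun (st : PySem.Set Char × List (List (String × Int))) c =>
        if PySem.Set.contains st.1 c then st
        else (PySem.Set.add st.1 c,
              st.2 ++ [[(String.ofList [c], (PySem.List.count modified_string c : Int))]]))
      (PySem.Set.empty, [])).2

-- ===== PORT B =====
-- Source B's inner 'while j' advances past the run of chars[i] (= takeWhile on the suffix);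
-- 'i = j' moves to the rest of the list (= dropWhile); j - i is the run length. Exact.
def ccRuns : List Char → List (List (String × Int))
  | [] => []
  | c :: rest =>
    [(String.ofList [c], ((rest.takeWhile (· == c)).length + 1 : Int))]
      :: ccRuns (rest.dropWhile (· == c))
  termination_by l => l.length
  decreasing_by
    simpa using Nat.lt_succ_of_le (List.length_dropWhile_le _ _)

def characters_count_alt (string : String) : List (List (String × Int)) :=
  ccRuns (PySem.List.sorted (string.toList.filter (fun c => !(PySem.Chars.isdigit c))) (fun c => c) false)

-- ===== PRECONDITION & SPEC =====
def Spec_characters_count (string : String) (out : List (List (String × Int))) : Prop := out = characters_count_alt string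
instance (string : String) (out : List (List (String × Int))) : Decidable (Spec_characters_count string out) := by unfold Spec_characters_count; infer_instance

-- ===== CLAIM (what is proved, stated in full; the proofs are below) =====
def Claim_equal_characters_count : Prop := ∀ (string : String), Dom_characters_count string → Spec_characters_count string (characters_count string)

-- ===== LEMMAS AND PROOFS =====

-- sorting then filtering = filtering then sorting (identity key)
lemma cc_filter_sorted (xs : List Char) (p : Char → Bool) :
    PySem.List.sorted (xs.filter p) (fun c => c) false
      = (PySem.List.sorted xs (fun c => c) false).filter p := by
  apply PySem.List.sorted_id_eq_of_perm_of_pairwise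
  · exact (PySem.List.sorted_perm xs (fun c => c) false).filter p
  · exact (PySem.List.sorted_pairwise xs (fun c => c)).filter p

lemma cc_dropWhile_gt (c : Char) :
    ∀ (rest : List Char), rest.Pairwise (· ≤ ·) → (∀ y ∈ rest, c ≤ y) →
      ∀ x ∈ rest.dropWhile (· == c), c < x := by
  intro rest
  induction rest with
  | nil => intro _ _ x hx; simp at hx
  | cons a t ih =>
    intro hp hle x hx
    by_cases ha : a = c
    · subst ha
      simp only [List.dropWhile_cons, BEq.rfl, if_pos] at hx
      exact ih (List.Pairwise.of_cons hp) (fun y hy => hle y (List.mem_cons_of_mem _ hy)) x hx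
    · have hac : (a == c) = false := by simp [ha]
      simp only [List.dropWhile_cons, hac] at hx
      have hca : c < a := lt_of_le_of_ne (hle a (List.mem_cons_self)) (Ne.symm ha)
      rcases List.mem_cons.mp hx with rfl | hxt
      · exact hca
      · exact lt_of_lt_of_le hca ((List.pairwise_cons.mp hp).1 x hxt)

lemma cc_skip_seen (m : List Char) :
    ∀ (g : List Char) (s : PySem.Set Char) (acc : List (List (String × Int))),
      (∀ x ∈ g, PySem.Set.contains s x = true) →
      g.foldl
        (fun (st : PySem.Set Char × List (List (String × Int))) c =>
          if PySem.Set.contains st.1 c then st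
          else (PySem.Set.add st.1 c,
                st.2 ++ [[(String.ofList [c], (PySem.List.count m c : Int))]]))
        (s, acc) = (s, acc) := by
  intro g
  induction g with
  | nil => intro s acc _; rfl
  | cons a t ih =>
    intro s acc h
    have ha := h a List.mem_cons_self
    simp only [List.foldl_cons, ha, if_pos]
    exact ih s acc (fun x hx => h x (List.mem_cons_of_mem _ hx))

lemma cc_fold_eq_runs (m : List Char) :
    ∀ (l : List Char), ∀ (s : PySem.Set Char) (acc : List (List (String × Int))),
      l.Pairwise (· ≤ ·) →
      (∀ c ∈ l, PySem.List.count m c = PySem.List.count l c) →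
      (∀ c ∈ l, PySem.Set.contains s c = false) →
      (l.foldl
        (fun (st : PySem.Set Char × List (List (String × Int))) c =>
          if PySem.Set.contains st.1 c then st
          else (PySem.Set.add st.1 c,
                st.2 ++ [[(String.ofList [c], (PySem.List.count m c : Int))]]))
        (s, acc)).2 = acc ++ ccRuns l
  | [] => by intro s acc _ _ _; simp [ccRuns]
  | c :: rest => by
      intro s acc hp hcount hfresh
      have hc0 := hfresh c List.mem_cons_self
      have hle : ∀ y ∈ rest, c ≤ y := (List.pairwise_cons.mp hp).1
      have hpr : rest.Pairwise (· ≤ ·) := (List.pairwise_cons.mp hp).2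
      set g := rest.takeWhile (· == c) with hg
      set rest' := rest.dropWhile (· == c) with hr
      have hsplit : g ++ rest' = rest := List.takeWhile_append_dropWhile
      have hgall : ∀ x ∈ g, x = c := by
        intro x hx; simpa using List.mem_takeWhile_imp hx
      have hgt : ∀ x ∈ rest', c < x := cc_dropWhile_gt c rest hpr hle
      -- the head count: count m c = run length
      have hcr' : PySem.List.count rest' c = 0 := by
        rw [PySem.List.count_eq, List.count_eq_zero]
        intro hmem; exact absurd rfl (ne_of_gt (hgt c hmem))
      have hcg : PySem.List.count g c = g.length := by
        rw [PySem.List.count_eq, List.count_eq_length]; intro x hx; simp [hgall x hx]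
      have hcl : PySem.List.count m c = (g.length + 1 : Nat) := by
        rw [hcount c List.mem_cons_self, PySem.List.count_eq]
        rw [PySem.List.count_eq] at hcg hcr'
        rw [← hsplit, List.count_cons, List.count_append, hcg, hcr']
        simp
      -- one step for c
      simp only [List.foldl_cons, hc0, Bool.false_eq_true, if_false]
      -- fold over g does nothing
      rw [← hsplit, List.foldl_append]
      have hseen : ∀ x ∈ g, PySem.Set.contains (PySem.Set.add s c) x = true := by
        intro x hx; rw [hgall x hx]
        simp [PySem.Set.mem_add]
      rw [cc_skip_seen m g _ _ hseen]
      -- recurse on rest'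
      have hlen : rest'.length < (c :: rest).length := by
        simp only [List.length_cons]
        exact Nat.lt_succ_of_le (List.length_dropWhile_le _ _)
      have hpr' : rest'.Pairwise (· ≤ ·) := hpr.sublist (List.dropWhile_sublist _)
      have hmemrest : ∀ x ∈ rest', x ∈ rest := fun x hx => (List.dropWhile_sublist _).mem hx
      have hcount' : ∀ c' ∈ rest', PySem.List.count m c' = PySem.List.count rest' c' := by
        intro c' hc'
        have hne : c' ≠ c := ne_of_gt (hgt c' hc')
        rw [hcount c' (List.mem_cons_of_mem _ (hmemrest c' hc')), PySem.List.count_eq, PySem.List.count_eq]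
        rw [← hsplit, List.count_cons, List.count_append]
        have : g.count c' = 0 := by
          rw [List.count_eq_zero]; intro hmem
          exact hne ((hgall c' hmem))
        simp [this, Ne.symm hne]
      have hfresh' : ∀ c' ∈ rest', PySem.Set.contains (PySem.Set.add s c) c' = false := by
        intro c' hc'
        have hne : c' ≠ c := ne_of_gt (hgt c' hc')
        have : PySem.Set.contains s c' = false :=
          hfresh c' (List.mem_cons_of_mem _ (hmemrest c' hc'))
        simp only [Bool.eq_false_iff, Ne, PySem.Set.contains_iff] at this ⊢
        simp [PySem.Set.mem_add, hne, this]
      rw [cc_fold_eq_runs m rest' _ _ hpr' hcount' hfresh']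
      -- assemble
      rw [hsplit]
      show (acc ++ [[(String.ofList [c], (PySem.List.count m c : Int))]]) ++ ccRuns rest'
            = acc ++ ccRuns (c :: rest)
      rw [ccRuns, ← hg, ← hr, hcl]
      simp [List.append_assoc]
termination_by l => l.length
decreasing_by simpa using Nat.lt_succ_of_le (List.length_dropWhile_le _ _)

-- ===== VERDICT (by name: the statement is the Claim_ definition above) =====
theorem characters_count_spec : Claim_equal_characters_count := by
  unfold Claim_equal_characters_count
  intro string _
  unfold Spec_characters_count characters_count characters_count_alt
  rw [cc_filter_sorted]
  simp only []
  split_ifs with he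
  · rw [List.isEmpty_iff] at he
    rw [he]
    simp [ccRuns]
  · have hpm : ((PySem.List.sorted string.toList (fun c => c) false).filter
        (fun i => !(PySem.Chars.isdigit i))).Pairwise (· ≤ ·) :=
      (PySem.List.sorted_pairwise string.toList (fun c => c)).filter _
    have := cc_fold_eq_runs
      ((PySem.List.sorted string.toList (fun c => c) false).filter (fun i => !(PySem.Chars.isdigit i)))
      ((PySem.List.sorted string.toList (fun c => c) false).filter (fun i => !(PySem.Chars.isdigit i)))
      PySem.Set.empty [] hpm (fun c _ => rfl)
      (fun c _ => by simp [PySem.Set.empty])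
    simpa using this
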